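-- pv_equiv track=rewrite | github.com/tetherless-world/study-cohort-ontology | breast-cancer-staging/ajcc_r8_annotated_guideline_extractor.py | getTNMCombinations
-- ===== SOURCE A (Python) =====
-- POSSIBLE_T_VALUES = {0,1,2,3,4}
--
-- POSSIBLE_N_VALUES = {0,1,2,3}
--
-- POSSIBLE_M_VALUES = {0,1}
--
-- def getTNMCombinations(tnm):
--     """
--     Given the tnm string expand the rule set.
--     There is no specific value for T, N, or M if the staging rule is applicable for any value of those biomarkers.
--     :param tnm:
--     :return: all the combinations of TNM with explicit values
--     """
--     tnmSplit = tnm.split(" ")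
--     tStr = tnmSplit[0]
--     nStr = tnmSplit[1]
--     mStr = tnmSplit[2]
--     tnmCombinations = []
--
--     if tStr == "T":
--         if nStr == "N":
--             if mStr == "M":
--                 for t in POSSIBLE_T_VALUES:
--                     for n in POSSIBLE_N_VALUES:
--                         for m in POSSIBLE_M_VALUES:
--                             tnmCombinations.append("T%d N%d M%d" % (t, n, m))
--             else:
--                 for t in POSSIBLE_T_VALUES:
--                     for n in POSSIBLE_N_VALUES:
--                         tnmCombinations.append("T%d N%d %s" % (t, n, mStr))
--         else:
--             for t in POSSIBLE_T_VALUES: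
--                 tnmCombinations.append("T%d %s %s" % (t, nStr, mStr))
--     else:
--         tnmCombinations.append("%s %s %s" % (tStr, nStr, mStr))
--     return tnmCombinations
-- ===== SOURCE B (Python) =====
-- POSSIBLE_T_VALUES = {0, 1, 2, 3, 4}
-- POSSIBLE_N_VALUES = {0, 1, 2, 3}
-- POSSIBLE_M_VALUES = {0, 1}
--
--
-- def getTNMCombinations(tnm):
--     """Expand the TNM rule string into explicit value combinations.
--
--     Builds one option list per biomarker (expanded only while every biomarker
--     to its left is also a wildcard, matching the prefix-only expansion) and
--     takes a single unified triple product instead of branch-specific nested loops.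
--     """
--     parts = tnm.split(" ")
--     tStr, nStr, mStr = parts[0], parts[1], parts[2]
--     tOpts = ["T%d" % t for t in POSSIBLE_T_VALUES] if tStr == "T" else [tStr]
--     nOpts = ["N%d" % n for n in POSSIBLE_N_VALUES] if tStr == "T" and nStr == "N" else [nStr]
--     mOpts = ["M%d" % m for m in POSSIBLE_M_VALUES] if tStr == "T" and nStr == "N" and mStr == "M" else [mStr]
--     return [t + " " + n + " " + m for t in tOpts for n in nOpts for m in mOpts]
-- ===== Notes on version B (the rewrite author's own statement) =====
-- stated objective: simpler
-- what changed: B replaces A's four hardcoded branch-specific nested loops by building one option list per biomarker (expanded only while every biomarker to its left is a wildcard) and a single unified triple product joined with spaces.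
import Mathlib
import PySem

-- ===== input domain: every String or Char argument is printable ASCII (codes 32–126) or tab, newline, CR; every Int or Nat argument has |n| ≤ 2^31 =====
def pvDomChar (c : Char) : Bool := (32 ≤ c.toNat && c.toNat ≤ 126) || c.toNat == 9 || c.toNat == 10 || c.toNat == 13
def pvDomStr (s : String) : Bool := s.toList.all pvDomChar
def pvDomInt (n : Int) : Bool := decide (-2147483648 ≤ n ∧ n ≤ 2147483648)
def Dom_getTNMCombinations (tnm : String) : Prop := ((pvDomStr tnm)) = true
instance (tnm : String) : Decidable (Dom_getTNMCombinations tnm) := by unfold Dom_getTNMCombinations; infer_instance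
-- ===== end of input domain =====

-- B replaces A's four branch-specific nested loops by three gated option lists and one
-- unified triple product (objective: simpler). Equivalence is on the return value.

-- ===== PORT A =====
-- Python set literals {0,1,2,3,4} / {0,1,2,3} / {0,1}: CPython's iteration (hash) order over
-- these small-int sets is ascending, identical to this insertion order, so iterating the
-- PySem.Set in list order is exact here.
def POSSIBLE_T_VALUES : List Int := PySem.Set.ofList [0, 1, 2, 3, 4]
def POSSIBLE_N_VALUES : List Int := PySem.Set.ofList [0, 1, 2, 3]
def POSSIBLE_M_VALUES : List Int := PySem.Set.ofList [0, 1]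

def getTNMCombinations (tnm : String) : List String :=
  let tnmSplit := (PySem.Str.split? tnm " ").getD []  -- sep nonempty: never none
  let tStr := (PySem.List.pyGet? tnmSplit 0).getD ""   -- tnmSplit[0]; in range under Pre_
  let nStr := (PySem.List.pyGet? tnmSplit 1).getD ""   -- tnmSplit[1]
  let mStr := (PySem.List.pyGet? tnmSplit 2).getD ""   -- tnmSplit[2]
  if tStr == "T" then
    if nStr == "N" then
      if mStr == "M" then
        POSSIBLE_T_VALUES.foldl (fun acc t =>
          POSSIBLE_N_VALUES.foldl (fun acc n =>
            POSSIBLE_M_VALUES.foldl (fun acc m =>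
              acc ++ ["T" ++ PySem.Int.toStr t ++ " N" ++ PySem.Int.toStr n ++ " M" ++ PySem.Int.toStr m]) acc) acc) []
      else
        POSSIBLE_T_VALUES.foldl (fun acc t =>
          POSSIBLE_N_VALUES.foldl (fun acc n =>
            acc ++ ["T" ++ PySem.Int.toStr t ++ " N" ++ PySem.Int.toStr n ++ " " ++ mStr]) acc) []
    else
      POSSIBLE_T_VALUES.foldl (fun acc t =>
        acc ++ ["T" ++ PySem.Int.toStr t ++ " " ++ nStr ++ " " ++ mStr]) []
  else
    [tStr ++ " " ++ nStr ++ " " ++ mStr]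

-- ===== PORT B =====
def getTNMCombinations_alt (tnm : String) : List String :=
  let parts := (PySem.Str.split? tnm " ").getD []  -- sep nonempty: never none
  let tStr := (PySem.List.pyGet? parts 0).getD ""   -- parts[0]; in range under Pre_
  let nStr := (PySem.List.pyGet? parts 1).getD ""   -- parts[1]
  let mStr := (PySem.List.pyGet? parts 2).getD ""   -- parts[2]
  let tOpts := if tStr == "T" then POSSIBLE_T_VALUES.map (fun t => "T" ++ PySem.Int.toStr t) else [tStr]
  let nOpts := if tStr == "T" && nStr == "N" then POSSIBLE_N_VALUES.map (fun n => "N" ++ PySem.Int.toStr n) else [nStr]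
  let mOpts := if tStr == "T" && nStr == "N" && mStr == "M" then POSSIBLE_M_VALUES.map (fun m => "M" ++ PySem.Int.toStr m) else [mStr]
  tOpts.flatMap (fun t => nOpts.flatMap (fun n => mOpts.map (fun m => t ++ " " ++ n ++ " " ++ m)))

-- ===== PRECONDITION & SPEC =====
-- Pre_ excludes exactly the strings with fewer than two spaces, on which A raises IndexError
-- (tnm.split(" ") then has fewer than three parts).
def Pre_getTNMCombinations (tnm : String) : Prop := 2 ≤ PySem.Str.count tnm " "
instance (tnm : String) : Decidable (Pre_getTNMCombinations tnm) := by unfold Pre_getTNMCombinations; infer_instance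
def pvWitness_getTNMCombinations : String := "T N M0"

def Spec_getTNMCombinations (tnm : String) (out : List String) : Prop := out = getTNMCombinations_alt tnm
instance (tnm : String) (out : List String) : Decidable (Spec_getTNMCombinations tnm out) := by unfold Spec_getTNMCombinations; infer_instance

-- ===== CLAIM (what is proved, stated in full; the proofs are below) =====
def Claim_equal_getTNMCombinations : Prop := ∀ (tnm : String), Dom_getTNMCombinations tnm → Pre_getTNMCombinations tnm → Spec_getTNMCombinations tnm (getTNMCombinations tnm)

-- ===== LEMMAS AND PROOFS =====

-- The branch bodies agree for arbitrary component strings (the proof never needs Pre_: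
-- both ports read the same three components the same way).
set_option maxHeartbeats 2000000 in
theorem getTNMCombinations_core (tS nS mS : String) :
    (if tS == "T" then
      if nS == "N" then
        if mS == "M" then
          POSSIBLE_T_VALUES.foldl (fun acc t =>
            POSSIBLE_N_VALUES.foldl (fun acc n =>
              POSSIBLE_M_VALUES.foldl (fun acc m =>
                acc ++ ["T" ++ PySem.Int.toStr t ++ " N" ++ PySem.Int.toStr n ++ " M" ++ PySem.Int.toStr m]) acc) acc) []
        else
          POSSIBLE_T_VALUES.foldl (fun acc t =>
            POSSIBLE_N_VALUES.foldl (fun acc n =>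
              acc ++ ["T" ++ PySem.Int.toStr t ++ " N" ++ PySem.Int.toStr n ++ " " ++ mS]) acc) []
      else
        POSSIBLE_T_VALUES.foldl (fun acc t =>
          acc ++ ["T" ++ PySem.Int.toStr t ++ " " ++ nS ++ " " ++ mS]) []
    else
      [tS ++ " " ++ nS ++ " " ++ mS]) =
    (let tOpts := if tS == "T" then POSSIBLE_T_VALUES.map (fun t => "T" ++ PySem.Int.toStr t) else [tS]
     let nOpts := if tS == "T" && nS == "N" then POSSIBLE_N_VALUES.map (fun n => "N" ++ PySem.Int.toStr n) else [nS]
     let mOpts := if tS == "T" && nS == "N" && mS == "M" then POSSIBLE_M_VALUES.map (fun m => "M" ++ PySem.Int.toStr m) else [mS]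
     tOpts.flatMap (fun t => nOpts.flatMap (fun n => mOpts.map (fun m => t ++ " " ++ n ++ " " ++ m)))) := by
  by_cases hT : tS = "T"
  · by_cases hN : nS = "N"
    · by_cases hM : mS = "M"
      · subst hT; subst hN; subst hM; decide
      · subst hT; subst hN
        simp only [beq_self_eq_true, if_pos, beq_iff_eq, hM, Bool.and_self,
          Bool.true_and, if_false, POSSIBLE_T_VALUES, POSSIBLE_N_VALUES, PySem.Set.ofList]
        simp only [PySem.Set.add, PySem.Set.contains, List.foldl, List.flatMap, List.map]
        rfl
    · subst hT
      simp only [beq_self_eq_true, if_pos, beq_iff_eq, hN, Bool.true_and,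
        if_false, POSSIBLE_T_VALUES, PySem.Set.ofList]
      simp only [PySem.Set.add, PySem.Set.contains, List.foldl, List.flatMap, List.map]
      simp [hN, List.foldl]
  · simp [hT]

-- ===== VERDICT (by name: the statement is the Claim_ definition above) =====
theorem getTNMCombinations_spec : Claim_equal_getTNMCombinations := by
  intro tnm _ _
  unfold Spec_getTNMCombinations getTNMCombinations getTNMCombinations_alt
  exact getTNMCombinations_core _ _ _
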